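-- pv_equiv track=rewrite | github.com/opservabla/Opservabla | 6 cas/zadatak_8.py | min_duzina
-- ===== SOURCE A (Python) =====
-- def min_duzina(lista_reci):
--     trMin = None
--     indeksListe = None
--     for i in range(len(lista_reci)):
--         lista_slova = lista_reci[i]
--         brojac = len(lista_slova)
--         if trMin == None:
--             trMin = brojac
--             indeksListe = i
--         elif brojac < trMin:
--             trMin = brojac
--             indeksListe = i
--
--     return indeksListe
-- ===== SOURCE B (Python) =====
-- def min_duzina(lista_reci):
--     if not lista_reci:
--         return None
--     duzine = [len(rec) for rec in lista_reci]
--     return duzine.index(min(duzine))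
-- ===== Notes on version B (the rewrite author's own statement) =====
-- stated objective: simpler
-- what changed: Replaces A's single stateful running-minimum loop (two Optional accumulators updated index by index) with a table-then-two-scans decomposition: build the list of lengths, take min(), return its first index via list.index.
import Mathlib
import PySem

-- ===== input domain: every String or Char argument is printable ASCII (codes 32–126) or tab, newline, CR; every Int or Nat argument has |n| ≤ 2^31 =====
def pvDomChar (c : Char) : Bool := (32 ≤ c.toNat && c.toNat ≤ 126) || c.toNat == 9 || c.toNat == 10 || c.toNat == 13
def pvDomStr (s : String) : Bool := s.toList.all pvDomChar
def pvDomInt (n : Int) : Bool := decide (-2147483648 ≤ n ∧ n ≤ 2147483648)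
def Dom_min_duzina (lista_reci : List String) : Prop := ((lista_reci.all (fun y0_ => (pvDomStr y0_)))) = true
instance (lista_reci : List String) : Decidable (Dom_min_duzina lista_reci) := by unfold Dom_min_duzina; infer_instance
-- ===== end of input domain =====

-- ===== PORT A =====
-- B is a simpler decomposition of the same O(n) task (lengths table, min(), index()); return values proven equal.
def min_duzina (lista_reci : List String) : Option Int :=
  let st : Option Int × Option Int :=
    (PySem.List.pyRange 0 (PySem.List.len lista_reci) 1).foldl
      (fun (st : Option Int × Option Int) i =>
        let lista_slova := PySem.List.pyGetD lista_reci i ""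
        let brojac := PySem.Str.len lista_slova
        match st.1 with
        | none => (some brojac, some i)
        | some trMin => if brojac < trMin then (some brojac, some i) else st)
      (none, none)
  st.2

-- ===== PORT B =====
def min_duzina_alt (lista_reci : List String) : Option Int :=
  if lista_reci = [] then none
  else
    let duzine : List Int := lista_reci.map PySem.Str.len
    (PySem.List.min? duzine (fun x => x)).bind (fun m =>
      (PySem.List.index? duzine m).map (fun k => (k : Int)))

-- ===== PRECONDITION & SPEC =====
def Spec_min_duzina (lista_reci : List String) (out : Option Int) : Prop := out = min_duzina_alt lista_reci
instance (lista_reci : List String) (out : Option Int) : Decidable (Spec_min_duzina lista_reci out) := by unfold Spec_min_duzina; infer_instance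

-- ===== CLAIM =====
def Claim_equal_min_duzina : Prop := ∀ (lista_reci : List String), Dom_min_duzina lista_reci → Spec_min_duzina lista_reci (min_duzina lista_reci)

-- ===== LEMMAS AND PROOFS =====

-- A's loop body, with the pair (index, word) taken together (as enumerate delivers it)
def pvStep (st : Option Int × Option Int) (p : Int × String) : Option Int × Option Int :=
  match st.1 with
  | none => (some (PySem.Str.len p.2), some p.1)
  | some trMin => if PySem.Str.len p.2 < trMin then (some (PySem.Str.len p.2), some p.1) else st

-- running minimum of the lengths, starting from m
def pvFmin (t : List String) (m : Int) : Int := t.foldl (fun a x => min a (PySem.Str.len x)) m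

-- index of the running minimum, as A's loop maintains it
def pvBidx : List String → Int → Int → Int → Int
  | [], _, _, j => j
  | x :: t, s, m, j => if PySem.Str.len x < m then pvBidx t (s+1) (PySem.Str.len x) s else pvBidx t (s+1) m j

theorem pvFmin_cons (x : String) (t : List String) (m : Int) :
    pvFmin (x :: t) m = pvFmin t (min m (PySem.Str.len x)) := rfl

theorem pvFmin_le (t : List String) (m : Int) : pvFmin t m ≤ m := by
  induction t generalizing m with
  | nil => simp [pvFmin]
  | cons x t ih =>
    calc pvFmin (x :: t) m = pvFmin t (min m (PySem.Str.len x)) := rfl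
    _ ≤ min m (PySem.Str.len x) := ih _
    _ ≤ m := min_le_left _ _

theorem pvFmin_cons_lt (x : String) (t : List String) (m : Int) (h : PySem.Str.len x < m) :
    pvFmin (x :: t) m = pvFmin t (PySem.Str.len x) := by
  rw [pvFmin_cons, min_eq_right h.le]

theorem pvFmin_cons_ge (x : String) (t : List String) (m : Int) (h : ¬ PySem.Str.len x < m) :
    pvFmin (x :: t) m = pvFmin t m := by
  rw [pvFmin_cons, min_eq_left (not_lt.mp h)]

theorem pvL1 (t : List String) (s m j : Int) :
    (PySem.List.enumerate t s).foldl pvStep (some m, some j)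
      = (some (pvFmin t m), some (pvBidx t s m j)) := by
  induction t generalizing s m j with
  | nil => simp [PySem.List.enumerate_nil, pvFmin, pvBidx]
  | cons x t ih =>
    rw [PySem.List.enumerate_cons, List.foldl_cons]
    show List.foldl pvStep
        (if PySem.Str.len x < m then (some (PySem.Str.len x), some s) else (some m, some j))
        (PySem.List.enumerate t (s+1)) = _
    by_cases h : PySem.Str.len x < m
    · rw [if_pos h, ih, pvFmin_cons_lt x t m h]
      show _ = (_, some (if PySem.Str.len x < m then pvBidx t (s+1) (PySem.Str.len x) s
        else pvBidx t (s+1) m j))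
      rw [if_pos h]
    · rw [if_neg h, ih, pvFmin_cons_ge x t m h]
      show _ = (_, some (if PySem.Str.len x < m then pvBidx t (s+1) (PySem.Str.len x) s
        else pvBidx t (s+1) m j))
      rw [if_neg h]

theorem pvL2' (t : List String) (s m j : Int) (h : ¬ pvFmin t m < m) :
    pvBidx t s m j = j := by
  induction t generalizing s m j with
  | nil => simp [pvBidx]
  | cons x t ih =>
    have hx : ¬ PySem.Str.len x < m := by
      intro hx
      rw [pvFmin_cons_lt x t m hx] at h
      exact h (lt_of_le_of_lt (pvFmin_le t (PySem.Str.len x)) hx)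
    rw [pvFmin_cons_ge x t m hx] at h
    simp only [pvBidx, if_neg hx]
    exact ih _ _ _ h

theorem pvL2 (t : List String) (s m j : Int) (h : pvFmin t m < m) :
    ∃ k : Nat, PySem.List.index? (t.map PySem.Str.len) (pvFmin t m) = some k ∧
      pvBidx t s m j = s + k := by
  induction t generalizing s m j with
  | nil => simp [pvFmin] at h
  | cons x t ih =>
    rw [List.map_cons]
    by_cases hx : PySem.Str.len x < m
    · rw [pvFmin_cons_lt x t m hx]
      by_cases h2 : pvFmin t (PySem.Str.len x) < PySem.Str.len x
      · obtain ⟨k, hk, hb⟩ := ih (s+1) (PySem.Str.len x) s h2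
        refine ⟨k+1, ?_, ?_⟩
        · rw [PySem.List.index?_cons_of_ne _
            (show PySem.Str.len x ≠ pvFmin t (PySem.Str.len x) by omega), hk]; rfl
        · show (if PySem.Str.len x < m then pvBidx t (s+1) (PySem.Str.len x) s
            else pvBidx t (s+1) m j) = s + ((k+1 : Nat) : Int)
          rw [if_pos hx, hb]; push_cast; ring
      · have he : pvFmin t (PySem.Str.len x) = PySem.Str.len x :=
          le_antisymm (pvFmin_le _ _) (not_lt.mp h2)
        refine ⟨0, ?_, ?_⟩
        · rw [he]; exact PySem.List.index?_cons_self _ _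
        · simp only [pvBidx, if_pos hx]
          rw [pvL2' t (s+1) (PySem.Str.len x) s h2]
          simp
    · rw [pvFmin_cons_ge x t m hx]
      rw [pvFmin_cons_ge x t m hx] at h
      obtain ⟨k, hk, hb⟩ := ih (s+1) m j h
      refine ⟨k+1, ?_, ?_⟩
      · rw [PySem.List.index?_cons_of_ne _
          (show PySem.Str.len x ≠ pvFmin t m by omega), hk]; rfl
      · show (if PySem.Str.len x < m then pvBidx t (s+1) (PySem.Str.len x) s
          else pvBidx t (s+1) m j) = s + ((k+1 : Nat) : Int)
        rw [if_neg hx, hb]; push_cast; ring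

theorem pvA_eq (l : List String) :
    min_duzina l = ((PySem.List.enumerate l 0).foldl pvStep (none, none)).2 := by
  unfold min_duzina
  rw [PySem.List.enumerate_eq_map_pyRange (d := ""), List.foldl_map]
  rfl

-- ===== VERDICT =====
theorem min_duzina_spec : Claim_equal_min_duzina := by
  intro l _
  unfold Spec_min_duzina
  cases l with
  | nil => simp [min_duzina, min_duzina_alt, PySem.List.pyRange]
  | cons x t =>
    rw [pvA_eq, PySem.List.enumerate_cons, List.foldl_cons]
    rw [show pvStep (none, none) (0, x) = (some (PySem.Str.len x), some 0) from rfl]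
    rw [pvL1]
    unfold min_duzina_alt
    rw [if_neg (List.cons_ne_nil x t)]
    simp only [List.map_cons]
    rw [PySem.List.min?_id_cons]
    have hfold : (t.map PySem.Str.len).foldl min (PySem.Str.len x) = pvFmin t (PySem.Str.len x) := by
      rw [pvFmin]; rw [List.foldl_map]
    rw [hfold]
    by_cases h : pvFmin t (PySem.Str.len x) < PySem.Str.len x
    · obtain ⟨k, hk, hb⟩ := pvL2 t 1 (PySem.Str.len x) 0 h
      have hidx : PySem.List.index? (PySem.Str.len x :: List.map PySem.Str.len t)
          (pvFmin t (PySem.Str.len x)) = some (k+1) := by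
        rw [PySem.List.index?_cons_of_ne _
          (show PySem.Str.len x ≠ pvFmin t (PySem.Str.len x) by omega), hk]; rfl
      simp only [Option.bind_some]
      rw [hidx, show (0:Int)+1 = 1 from rfl, hb]
      simp
      ring
    · have he : pvFmin t (PySem.Str.len x) = PySem.Str.len x :=
        le_antisymm (pvFmin_le _ _) (not_lt.mp h)
      have hidx : PySem.List.index? (PySem.Str.len x :: List.map PySem.Str.len t)
          (pvFmin t (PySem.Str.len x)) = some 0 := by
        rw [he]; exact PySem.List.index?_cons_self _ _
      simp only [Option.bind_some]
      rw [hidx, pvL2' t (0+1) (PySem.Str.len x) 0 (he ▸ h)]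
      simp
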